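-- pv_equiv track=rewrite | github.com/oguuk/Programmers | lv3/힙 디스크 컨트롤러.py | setReadyq
-- ===== SOURCE A (Python) =====
-- def setReadyq(time,jobs,check):
--     readyq = []
--     for i in reversed(jobs):
--         if i[0] <= time:
--             start,howLong = jobs.pop()
--             readyq.append([howLong,start])
--         else:
--             if len(jobs) > 0 and not readyq and not check:
--                 return setReadyq(jobs[-1][0],jobs,check)
--             break
--     return readyq,time
-- ===== SOURCE B (Python) =====
-- def _readyCount(time, jobs):
--     # length of the longest suffix of jobs whose start times are <= time
--     k = 0
--     for job in reversed(jobs):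
--         if job[0] <= time:
--             k += 1
--         else:
--             break
--     return k
--
-- def setReadyq(time, jobs, check):
--     n = len(jobs)
--     k = _readyCount(time, jobs)
--     if k == 0 and n > 0 and not check:
--         time = jobs[-1][0]
--         k = _readyCount(time, jobs)
--     readyq = [[d, s] for s, d in reversed(jobs[n - k:])]
--     del jobs[n - k:]
--     return readyq, time
-- ===== Notes on version B (the rewrite author's own statement) =====
-- stated objective: simpler
-- what changed: B replaces A's recursive pop-from-the-end loop by a non-recursive two-phase plan: count the ready suffix (re-counting once after the optional time reset), then build readyq from a slice and delete that slice, so there is no recursion and no element-by-element mutation.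
import Mathlib
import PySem

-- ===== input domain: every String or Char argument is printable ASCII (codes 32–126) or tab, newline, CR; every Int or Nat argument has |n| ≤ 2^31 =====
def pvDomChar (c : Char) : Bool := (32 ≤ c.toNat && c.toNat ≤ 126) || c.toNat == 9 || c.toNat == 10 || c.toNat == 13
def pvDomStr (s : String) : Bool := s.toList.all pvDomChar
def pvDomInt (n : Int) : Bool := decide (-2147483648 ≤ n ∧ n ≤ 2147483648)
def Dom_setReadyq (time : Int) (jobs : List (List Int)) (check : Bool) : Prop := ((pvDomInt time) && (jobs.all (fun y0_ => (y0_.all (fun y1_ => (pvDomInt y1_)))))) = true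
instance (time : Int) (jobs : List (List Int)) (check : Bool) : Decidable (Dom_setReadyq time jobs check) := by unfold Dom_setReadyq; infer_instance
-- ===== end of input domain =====

-- B is a non-recursive two-phase reformulation (count the ready suffix, then slice); objective: simpler.
-- Both A and B mutate `jobs` in Python (A pops the ready suffix element by element, B deletes the same
-- slice, leaving the identical list); the equivalence proved here is about the return value.

-- ===== PORT A =====
-- A's `for i in reversed(jobs)` with `jobs.pop()` in the taken branch always examines and pops the
-- current last element, so it is transcribed as a recursion over the reversed job list that moves
-- popped jobs into the accumulator `readyq` and stops at the first job with start > time.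
def popWhileA (time : Int) : List (List Int) → List (List Int) → List (List Int) × List (List Int)
  | [], acc => (acc, [])
  | j :: rest, acc =>
    if j.headD 0 ≤ time then popWhileA time rest (acc ++ [[j.getD 1 0, j.getD 0 0]])
    else (acc, j :: rest)

-- A's self-recursion (taken only when nothing was popped) is transcribed with a fuel counter as a
-- totality guard; `p.2` is the remaining jobs in reversed order, so `jobs[-1]` is `p.2.headD []`.
def setReadyqFuel : Nat → Int → List (List Int) → Bool → List (List Int) × Int
  | 0, time, _, _ => ([], time)
  | Nat.succ fuel, time, jobs, check =>
    let p := popWhileA time jobs.reverse []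
    if p.2 ≠ [] ∧ p.1 = [] ∧ check = false then
      setReadyqFuel fuel ((p.2.headD []).headD 0) p.2.reverse check
    else (p.1, time)

def setReadyq (time : Int) (jobs : List (List Int)) (check : Bool) : List (List Int) × Int :=
  setReadyqFuel (jobs.length + 1) time jobs check

-- ===== PORT B =====
-- Source B's _readyCount: walk reversed(jobs), count while job[0] <= time, stop at the first failure.
def readyCountB (time : Int) : List (List Int) → Nat
  | [] => 0
  | j :: rest => if j.headD 0 ≤ time then readyCountB time rest + 1 else 0

def setReadyq_alt (time : Int) (jobs : List (List Int)) (check : Bool) : List (List Int) × Int :=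
  let n := jobs.length
  let k := readyCountB time jobs.reverse
  let kt : Nat × Int :=
    if k = 0 ∧ 0 < n ∧ check = false then
      let t := (jobs.getLastD []).headD 0
      (readyCountB t jobs.reverse, t)
    else (k, time)
  ((jobs.drop (n - kt.1)).reverse.map (fun j => [j.getD 1 0, j.getD 0 0]), kt.2)

-- ===== PRECONDITION & SPEC =====
-- Pre_ holds exactly when every job the run examines has the shape Python's indexing/unpacking
-- needs: each job of the ready suffix (for the given time, and for the once-reset time when the
-- reset fires) has exactly 2 entries, and the job that stops the scan is nonempty; on every other
-- input the Python raises IndexError/ValueError.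
def scanOKb (t : Int) (r : List (List Int)) : Bool :=
  (r.takeWhile (fun j => decide (j.headD 0 ≤ t))).all (fun j => j.length == 2) &&
  (match (r.dropWhile (fun j => decide (j.headD 0 ≤ t))).head? with
   | some j => !j.isEmpty
   | none => true)

def Pre_setReadyq (time : Int) (jobs : List (List Int)) (check : Bool) : Prop :=
  scanOKb time jobs.reverse = true ∧
  (jobs.reverse.takeWhile (fun j => decide (j.headD 0 ≤ time)) = [] ∧ jobs ≠ [] ∧ check = false →
    scanOKb ((jobs.reverse.headD []).headD 0) jobs.reverse = true)
instance (time : Int) (jobs : List (List Int)) (check : Bool) : Decidable (Pre_setReadyq time jobs check) := by unfold Pre_setReadyq; infer_instance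

def pvWitness_setReadyq : Int × List (List Int) × Bool := (3, [[1, 4], [5, 2], [2, 1]], false)

def Spec_setReadyq (time : Int) (jobs : List (List Int)) (check : Bool) (out : List (List Int) × Int) : Prop := out = setReadyq_alt time jobs check
instance (time : Int) (jobs : List (List Int)) (check : Bool) (out : List (List Int) × Int) : Decidable (Spec_setReadyq time jobs check out) := by unfold Spec_setReadyq; infer_instance

-- ===== CLAIM (what is proved, stated in full; the proofs are below) =====
def Claim_equal_setReadyq : Prop := ∀ (time : Int) (jobs : List (List Int)) (check : Bool), Dom_setReadyq time jobs check → Pre_setReadyq time jobs check → Spec_setReadyq time jobs check (setReadyq time jobs check)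

-- ===== LEMMAS AND PROOFS =====

theorem popWhileA_eq (time : Int) (rjobs acc : List (List Int)) :
    popWhileA time rjobs acc =
      (acc ++ (rjobs.takeWhile (fun j => decide (j.headD 0 ≤ time))).map
          (fun j => [j.getD 1 0, j.getD 0 0]),
       rjobs.dropWhile (fun j => decide (j.headD 0 ≤ time))) := by
  induction rjobs generalizing acc with
  | nil => simp [popWhileA]
  | cons j rest ih =>
    rw [popWhileA, List.takeWhile_cons, List.dropWhile_cons]
    by_cases h : j.head?.getD 0 ≤ time
    · simp [h, ih]
    · simp [h]

theorem readyCountB_eq (time : Int) (rjobs : List (List Int)) :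
    readyCountB time rjobs = (rjobs.takeWhile (fun j => decide (j.headD 0 ≤ time))).length := by
  induction rjobs with
  | nil => rfl
  | cons j rest ih =>
    rw [readyCountB, List.takeWhile_cons]
    by_cases h : j.head?.getD 0 ≤ time
    · simp [h, ih]
    · simp [h]

theorem take_len_takeWhile (p : List Int → Bool) (l : List (List Int)) :
    l.take (l.takeWhile p).length = l.takeWhile p := by
  induction l with
  | nil => rfl
  | cons a t ih =>
    rw [List.takeWhile_cons]
    split
    · simpa using ih
    · rfl

theorem dropWhile_of_takeWhile_nil (p : List Int → Bool) (l : List (List Int))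
    (h : l.takeWhile p = []) : l.dropWhile p = l := by
  cases l with
  | nil => rfl
  | cons a t =>
    rw [List.takeWhile_cons] at h
    rw [List.dropWhile_cons]
    split at h
    · simp at h
    · simp_all

theorem getLastD_eq_headD_reverse (l : List (List Int)) (d : List Int) :
    l.getLastD d = l.reverse.headD d := by
  rw [List.getLastD_eq_getLast?, List.getLast?_eq_head?_reverse, List.headD_eq_head?]

theorem slice_eq_takeWhile (t : Int) (jobs : List (List Int)) :
    (jobs.drop (jobs.length -
        (jobs.reverse.takeWhile (fun j => decide (j.headD 0 ≤ t))).length)).reverse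
      = jobs.reverse.takeWhile (fun j => decide (j.headD 0 ≤ t)) := by
  rw [← List.take_reverse, take_len_takeWhile]

theorem ports_eq (time : Int) (jobs : List (List Int)) (check : Bool) :
    setReadyq time jobs check = setReadyq_alt time jobs check := by
  unfold setReadyq setReadyq_alt
  simp only [setReadyqFuel, popWhileA_eq, readyCountB_eq, List.nil_append]
  split
  case isTrue hA =>
    -- A recurses once: nothing was popped, jobs remain, check is false
    obtain ⟨h1, h2, hc⟩ := hA
    have hk : jobs.reverse.takeWhile (fun j => decide (j.headD 0 ≤ time)) = [] := by
      simpa using h2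
    rw [dropWhile_of_takeWhile_nil _ _ hk] at h1 ⊢
    have hjne : jobs ≠ [] := by
      intro h; rw [h] at h1; simp at h1
    obtain ⟨a, js, hjobs⟩ := List.exists_cons_of_ne_nil hjne
    subst hjobs
    rw [List.reverse_reverse, List.length_cons]
    simp only [setReadyqFuel, popWhileA_eq, List.nil_append]
    obtain ⟨q, qs, hrev⟩ := List.exists_cons_of_ne_nil (l := (a :: js).reverse) (by simp)
    rw [getLastD_eq_headD_reverse, hrev]
    rw [if_neg, if_pos]
    · -- both sides return the jobs ready at the reset time, and that time
      have hs := slice_eq_takeWhile (((q :: qs).headD []).headD 0) (a :: js)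
      rw [hrev] at hs
      simp only [List.length_cons] at hs ⊢
      rw [hs]
    · -- B's reset branch is taken
      refine ⟨by rw [hrev] at hk; rw [hk]; rfl, by simp, hc⟩
    · -- A's inner call pops the last job immediately, so it does not recurse again
      rw [List.takeWhile_cons]
      simp
  case isFalse hA =>
    -- no reset on either side
    rw [if_neg, slice_eq_takeWhile]
    intro ⟨hb1, hb2, hb3⟩
    rw [List.length_eq_zero_iff] at hb1
    exact hA ⟨by rw [dropWhile_of_takeWhile_nil _ _ hb1]
                 intro h
                 rw [List.reverse_eq_nil_iff] at h
                 rw [h] at hb2; simp at hb2,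
              by rw [hb1]; rfl, hb3⟩

-- ===== VERDICT (by name: the statement is the Claim_ definition above) =====
theorem setReadyq_spec : Claim_equal_setReadyq := by
  intro time jobs check _ _
  unfold Spec_setReadyq
  exact ports_eq time jobs check
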